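-- pv_equiv track=rewrite | github.com/dannsb/SkyTime | main.py | calcDayOfYear
-- ===== SOURCE A (Python) =====
-- def calcDayOfYear(month, day, dateType="persian"):
--     dayOfYear = 0
--     counter = 1
--     while counter < month:
--         if counter <= 6:
--             dayOfYear += 31
--         else:
--             dayOfYear += 30
--         counter += 1
--     dayOfYear = dayOfYear + day
--     return dayOfYear
-- ===== SOURCE B (Python) =====
-- def calcDayOfYear(month, day, dateType="persian"):
--     # closed form: months 1..6 have 31 days, months 7.. have 30 days
--     return 31 * min(max(month - 1, 0), 6) + 30 * max(month - 7, 0) + day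
-- ===== Notes on version B (the rewrite author's own statement) =====
-- stated objective: simpler
-- what changed: Replaced the while-loop summation of month lengths with a single closed-form arithmetic expression using min/max clamps.
import Mathlib
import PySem

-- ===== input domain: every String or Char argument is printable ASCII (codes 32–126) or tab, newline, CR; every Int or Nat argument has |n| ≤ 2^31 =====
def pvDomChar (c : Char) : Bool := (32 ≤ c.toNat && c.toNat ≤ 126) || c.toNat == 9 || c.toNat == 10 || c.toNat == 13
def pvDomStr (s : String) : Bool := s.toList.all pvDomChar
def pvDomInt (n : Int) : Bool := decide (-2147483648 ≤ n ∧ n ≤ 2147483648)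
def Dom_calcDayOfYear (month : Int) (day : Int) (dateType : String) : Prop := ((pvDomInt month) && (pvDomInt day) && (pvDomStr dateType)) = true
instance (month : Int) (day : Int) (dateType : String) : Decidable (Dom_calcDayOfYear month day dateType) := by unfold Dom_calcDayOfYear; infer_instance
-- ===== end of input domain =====

-- B replaces A's month-by-month while-loop with one closed-form min/max expression (objective: simpler).

-- ===== PORT A =====
-- the while-loop of A: state (dayOfYear, counter), runs while counter < month
def calcDayOfYearLoop (month : Int) (dayOfYear : Int) (counter : Int) : Int :=
  if counter < month then
    calcDayOfYearLoop month (if counter ≤ 6 then dayOfYear + 31 else dayOfYear + 30) (counter + 1)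
  else dayOfYear
termination_by (month - counter).toNat
decreasing_by omega

def calcDayOfYear (month : Int) (day : Int) (dateType : String) : Int :=
  calcDayOfYearLoop month 0 1 + day

-- ===== PORT B =====
def calcDayOfYear_alt (month : Int) (day : Int) (dateType : String) : Int :=
  31 * min (max (month - 1) 0) 6 + 30 * max (month - 7) 0 + day

-- ===== PRECONDITION & SPEC =====
def Spec_calcDayOfYear (month : Int) (day : Int) (dateType : String) (out : Int) : Prop := out = calcDayOfYear_alt month day dateType
instance (month : Int) (day : Int) (dateType : String) (out : Int) : Decidable (Spec_calcDayOfYear month day dateType out) := by unfold Spec_calcDayOfYear; infer_instance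

-- ===== CLAIM (what is proved, stated in full; the proofs are below) =====
def Claim_equal_calcDayOfYear : Prop := ∀ (month : Int) (day : Int) (dateType : String), Dom_calcDayOfYear month day dateType → Spec_calcDayOfYear month day dateType (calcDayOfYear month day dateType)

-- ===== LEMMAS AND PROOFS =====

-- closed form f(x) of the prefix sum of month lengths
def pvF (x : Int) : Int := 31 * min (max (x - 1) 0) 6 + 30 * max (x - 7) 0

-- loop invariant: starting at counter c (1 ≤ c, and c ≤ max month 1) with accumulator d,
-- the loop returns d + f(month) - f(c)
theorem calcDayOfYearLoop_eq (month : Int) : ∀ (n : Nat) (d c : Int),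
    n = (month - c).toNat → 1 ≤ c → c ≤ max month 1 →
    calcDayOfYearLoop month d c = d + pvF month - pvF c := by
  intro n
  induction n with
  | zero =>
    intro d c hn hc hcm
    rw [calcDayOfYearLoop]
    have : ¬ c < month := by omega
    simp only [this, if_false]
    simp only [pvF]
    omega
  | succ k ih =>
    intro d c hn hc hcm
    rw [calcDayOfYearLoop]
    by_cases h : c < month
    · simp only [h, if_true]
      rw [ih _ (c + 1) (by omega) (by omega) (by omega)]
      simp only [pvF]
      by_cases h6 : c ≤ 6 <;> simp [h6] <;> omega
    · simp only [h, if_false]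
      simp only [pvF]
      omega

-- ===== VERDICT (by name: the statement is the Claim_ definition above) =====
theorem calcDayOfYear_spec : Claim_equal_calcDayOfYear := by
  intro month day dateType _
  unfold Spec_calcDayOfYear calcDayOfYear calcDayOfYear_alt
  rw [calcDayOfYearLoop_eq month (month - 1).toNat 0 1 rfl (by omega) (by omega)]
  simp only [pvF]
  omega
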